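-- pv_equiv track=rewrite | github.com/Jerrycr2k1/ATBMTT | Code/Mã cổ điển/Vigenere .py | Chuyen
-- ===== SOURCE A (Python) =====
-- def Chuyen(string, key, update):
--     string = string.upper()
--     key = key.upper()
--     string_Num = []
--     Key_Num = []
--     for i in string:
--         string_Num.append(ord(i) - 65)
--     for i in range(len(string)):
--         if update:
--             if i >= len(key):
--                 Key_Num.append(ord(string[i - len(key)]) - 65)
--                 continue
--     # Basic
--         Key_Num.append(ord(key[i % (len(key))]) - 65)
--     return string_Num, Key_Num
-- ===== SOURCE B (Python) =====
-- def Chuyen(string, key, update):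
--     string_Num = []
--     Key_Num = []
--     q = [ord(c) - 65 for c in key.upper()]
--     head = 0
--     for ch in string.upper():
--         n = ord(ch) - 65
--         string_Num.append(n)
--         if update:
--             q.append(n)
--             k = q[head]
--         else:
--             k = q[head]
--             q.append(k)
--         head += 1
--         Key_Num.append(k)
--     return string_Num, Key_Num
-- ===== Notes on version B (the rewrite author's own statement) =====
-- stated objective: alternative
-- what changed: Replaced A's index-arithmetic loop (range over positions with a modular/offset branch into key or string) by a single online pass driven by a self-feeding key queue with a head pointer: each step reads the front key number and re-feeds the queue with the same number (cyclic) or with the current plaintext number (autokey), so no modular arithmetic or position/offset branching remains.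
import Mathlib
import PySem

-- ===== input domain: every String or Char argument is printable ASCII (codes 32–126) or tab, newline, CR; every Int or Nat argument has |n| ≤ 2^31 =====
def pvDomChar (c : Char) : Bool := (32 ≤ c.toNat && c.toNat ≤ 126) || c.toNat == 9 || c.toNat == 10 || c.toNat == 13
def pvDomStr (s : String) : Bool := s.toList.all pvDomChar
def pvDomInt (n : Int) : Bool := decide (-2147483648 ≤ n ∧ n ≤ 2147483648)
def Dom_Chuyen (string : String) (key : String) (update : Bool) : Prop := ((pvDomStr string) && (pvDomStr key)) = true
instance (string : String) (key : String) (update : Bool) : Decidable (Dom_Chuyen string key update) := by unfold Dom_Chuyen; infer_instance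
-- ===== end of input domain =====

-- B replaces A's index/mod loop by a single online pass driven by a self-feeding key queue
-- (pop the key value, re-feed the cycle or the current plaintext number): alternative algorithm, same cost.


-- ===== PORT A =====
-- literal transliteration of A: build string_Num by an appending loop over the chars,
-- then loop i over range(len(string)) with the update/continue branch.
def Chuyen (string : String) (key : String) (update : Bool) : List Int × List Int :=
  let s := PySem.Chars.upper string.toList
  let k := PySem.Chars.upper key.toList
  let stringNum := s.foldl (fun acc c => acc ++ [(c.toNat : Int) - 65]) []
  let keyNum := (PySem.List.pyRange 0 (s.length : Int)).foldl (fun acc i =>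
    if update = true ∧ (k.length : Int) ≤ i then
      acc ++ [((PySem.List.pyGetD s (i - (k.length : Int)) 'A').toNat : Int) - 65]
    else
      acc ++ [((PySem.List.pyGetD k (PySem.Int.mod i (k.length : Int)) 'A').toNat : Int) - 65]) []
  (stringNum, keyNum)

-- ===== PORT B =====
-- transliteration of Source B: one pass over the upper-cased string carrying (string_Num, Key_Num, q, head);
-- q is the key queue consumed via the head pointer: autokey pushes the plaintext number then reads q[head],
-- cyclic reads q[head] and re-pushes it; head advances each step.
def Chuyen_alt (string : String) (key : String) (update : Bool) : List Int × List Int :=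
  let q0 := (PySem.Chars.upper key.toList).map (fun c => (c.toNat : Int) - 65)
  let st := (PySem.Chars.upper string.toList).foldl
    (fun (st : List Int × List Int × List Int × Int) ch =>
      let n : Int := (ch.toNat : Int) - 65
      if update then
        let q' := st.2.2.1 ++ [n]
        let kv := PySem.List.pyGetD q' st.2.2.2 0
        (st.1 ++ [n], st.2.1 ++ [kv], q', st.2.2.2 + 1)
      else
        let kv := PySem.List.pyGetD st.2.2.1 st.2.2.2 0
        (st.1 ++ [n], st.2.1 ++ [kv], st.2.2.1 ++ [kv], st.2.2.2 + 1))
    ([], [], q0, 0)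
  (st.1, st.2.1)

-- ===== PRECONDITION & SPEC =====
-- Pre_ excludes only update = false with an empty key and a nonempty string, where A raises ZeroDivisionError
-- (and B's queue pop raises IndexError).
def Pre_Chuyen (string : String) (key : String) (update : Bool) : Prop :=
  update = true ∨ key.toList ≠ [] ∨ string.toList = []
instance (string : String) (key : String) (update : Bool) : Decidable (Pre_Chuyen string key update) := by unfold Pre_Chuyen; infer_instance
def pvWitness_Chuyen : String × String × Bool := ("AB", "K", false)
def Spec_Chuyen (string : String) (key : String) (update : Bool) (out : List Int × List Int) : Prop := out = Chuyen_alt string key update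
instance (string : String) (key : String) (update : Bool) (out : List Int × List Int) : Decidable (Spec_Chuyen string key update out) := by unfold Spec_Chuyen; infer_instance

-- ===== CLAIM (what is proved, stated in full; the proofs are below) =====
def Claim_equal_Chuyen : Prop := ∀ (string : String) (key : String) (update : Bool), Dom_Chuyen string key update → Pre_Chuyen string key update → Spec_Chuyen string key update (Chuyen string key update)

-- ===== LEMMAS AND PROOFS =====

-- take of a drop, peeled one element (specific combination both fold proofs need).
theorem pvDropTake (L : List Int) (j n : Nat) (h : j < L.length) :
    (L.drop j).take (n + 1) = L.getD j 0 :: (L.drop (j + 1)).take n := by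
  rw [List.drop_eq_getElem_cons h, List.take_succ_cons]
  simp [List.getD_eq_getElem?_getD, List.getElem?_eq_getElem h]

-- getD of an append, read inside the left part.
theorem pvGetDAppend (l l2 : List Int) (n : Nat) (h : n < l.length) :
    (l ++ l2).getD n 0 = l.getD n 0 := by
  simp [List.getD_eq_getElem?_getD, List.getElem?_append_left h]

-- B's autokey fold: q accumulates q0 ++ plaintext numbers; the head pointer reads the prefix in order.
theorem pvFoldTrue (s : List Char) : ∀ (a b q : List Int) (j : Nat), j ≤ q.length →
    s.foldl (fun (st : List Int × List Int × List Int × Int) ch =>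
      let n : Int := (ch.toNat : Int) - 65
      let q' := st.2.2.1 ++ [n]
      let kv := PySem.List.pyGetD q' st.2.2.2 0
      (st.1 ++ [n], st.2.1 ++ [kv], q', st.2.2.2 + 1)) (a, b, q, (j : Int))
    = (a ++ s.map (fun c => (c.toNat : Int) - 65),
       b ++ (((q ++ s.map (fun c => (c.toNat : Int) - 65)).drop j).take s.length),
       q ++ s.map (fun c => (c.toNat : Int) - 65),
       ((j + s.length : Nat) : Int)) := by
  induction s with
  | nil => intro a b q j hj; simp
  | cons c t ih =>
    intro a b q j hj
    simp only [List.foldl_cons]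
    have hjq : j < (q ++ [(c.toNat : Int) - 65]).length := by simp; omega
    have hcast : (j : Int) + 1 = ((j + 1 : Nat) : Int) := by push_cast; ring
    rw [PySem.List.pyGetD_natCast, hcast,
      ih _ _ (q ++ [(c.toNat : Int) - 65]) (j + 1) (by simp; omega)]
    have hn : ((q ++ [(c.toNat : Int) - 65]) ++ t.map (fun c => (c.toNat : Int) - 65))
        = q ++ (c :: t).map (fun c => (c.toNat : Int) - 65) := by
      simp
    have hL : j < (q ++ (c :: t).map (fun c => (c.toNat : Int) - 65)).length := by
      simp only [List.length_append, List.length_map, List.length_cons]; omega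
    refine Prod.ext (by simp) (Prod.ext ?_ (Prod.ext (by dsimp only; rw [hn])
      (by dsimp only [List.length_cons]; push_cast; ring)))
    dsimp only
    rw [hn, List.length_cons, pvDropTake _ _ _ hL, ← hn,
      pvGetDAppend _ _ _ hjq]
    simp
-- q0 is its own cyclic table of length q0.length.
theorem pvCycSelf (q0 : List Int) :
    q0 = (List.range q0.length).map (fun i => q0.getD (i % q0.length) 0) := by
  apply List.ext_getElem
  · simp
  · intro i h1 h2
    simp [Nat.mod_eq_of_lt h1, List.getD_eq_getElem?_getD, List.getElem?_eq_getElem h1]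

-- B's cyclic fold: q is always the cyclic extension of q0; the head pointer reads q0[(j+i) % m].
theorem pvFoldFalse (q0 : List Int) (h0 : q0 ≠ []) (s : List Char) : ∀ (a b : List Int) (j : Nat),
    s.foldl (fun (st : List Int × List Int × List Int × Int) ch =>
      let n : Int := (ch.toNat : Int) - 65
      let kv := PySem.List.pyGetD st.2.2.1 st.2.2.2 0
      (st.1 ++ [n], st.2.1 ++ [kv], st.2.2.1 ++ [kv], st.2.2.2 + 1))
      (a, b, (List.range (q0.length + j)).map (fun i => q0.getD (i % q0.length) 0), (j : Int))
    = (a ++ s.map (fun c => (c.toNat : Int) - 65),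
       b ++ (List.range s.length).map (fun i => q0.getD ((j + i) % q0.length) 0),
       (List.range (q0.length + j + s.length)).map (fun i => q0.getD (i % q0.length) 0),
       ((j + s.length : Nat) : Int)) := by
  induction s with
  | nil => intro a b j; simp
  | cons c t ih =>
    intro a b j
    have hm : 0 < q0.length := List.length_pos_iff.mpr h0
    simp only [List.foldl_cons]
    have hcast : (j : Int) + 1 = ((j + 1 : Nat) : Int) := by push_cast; ring
    have hjN : j < q0.length + j := by omega
    have hkv : ((List.range (q0.length + j)).map (fun i => q0.getD (i % q0.length) 0)).getD j 0
        = q0.getD (j % q0.length) 0 := by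
      simp [List.getD_eq_getElem?_getD, hjN]
    have hq' : (List.range (q0.length + j)).map (fun i => q0.getD (i % q0.length) 0)
          ++ [q0.getD (j % q0.length) 0]
        = (List.range (q0.length + (j + 1))).map (fun i => q0.getD (i % q0.length) 0) := by
      rw [show q0.length + (j + 1) = (q0.length + j) + 1 from by omega, List.range_succ,
        List.map_append]
      simp [Nat.add_mod_left]
    rw [PySem.List.pyGetD_natCast, hkv, hq', hcast, ih _ _ (j + 1)]
    refine Prod.ext (by simp) (Prod.ext ?_ (Prod.ext ?_
      (by dsimp only [List.length_cons]; push_cast; ring)))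
    · dsimp only
      conv_rhs => rw [List.length_cons, List.range_succ_eq_map]
      simp only [List.map_cons, List.map_map, Nat.add_zero]
      have hc : ((fun i => q0.getD ((j + i) % q0.length) 0) ∘ Nat.succ)
          = fun i => q0.getD ((j + 1 + i) % q0.length) 0 := by
        funext i
        simp only [Function.comp_apply, Nat.succ_eq_add_one]
        congr 2
        omega
      rw [hc]
      simp
    · dsimp only
      rw [show q0.length + (j + 1) + t.length = q0.length + j + (c :: t).length from by
        simp only [List.length_cons]; omega]

-- (map f k).getD j = f (k.getD j) for an in-range index.
theorem pvGetDMap (l : List Char) (j : Nat) (h : j < l.length) :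
    (l.map (fun c => (c.toNat : Int) - 65)).getD j 0 = ((l.getD j 'A').toNat : Int) - 65 := by
  simp [List.getD_eq_getElem?_getD, List.getElem?_eq_getElem h]

-- ===== VERDICT (by name: the statement is the Claim_ definition above) =====
theorem Chuyen_spec : Claim_equal_Chuyen := by
  intro string key update _ hpre
  unfold Spec_Chuyen Chuyen Chuyen_alt
  set s := PySem.Chars.upper string.toList with hs
  set k := PySem.Chars.upper key.toList with hk
  cases update with
  | true =>
    simp only [if_true, true_and]
    have hT := pvFoldTrue s [] [] (k.map (fun c => (c.toNat : Int) - 65)) 0 (Nat.zero_le _)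
    simp only [Nat.cast_zero, Nat.zero_add] at hT
    rw [hT]
    refine Prod.ext ?_ ?_
    · simpa using PySem.List.foldl_append_singleton_eq_map (fun c => (c.toNat : Int) - 65) s []
    · have hbody :
          (fun (acc : List Int) (i : Int) =>
            if (k.length : Int) ≤ i then
              acc ++ [((PySem.List.pyGetD s (i - (k.length : Int)) 'A').toNat : Int) - 65]
            else
              acc ++ [((PySem.List.pyGetD k (PySem.Int.mod i (k.length : Int)) 'A').toNat : Int) - 65])
          = fun acc i => acc ++
              [if (k.length : Int) ≤ i then
                ((PySem.List.pyGetD s (i - (k.length : Int)) 'A').toNat : Int) - 65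
              else
                ((PySem.List.pyGetD k (PySem.Int.mod i (k.length : Int)) 'A').toNat : Int) - 65] := by
        funext acc i
        split <;> rfl
      rw [hbody]
      simp only [PySem.List.foldl_append_singleton_eq_map, List.nil_append,
        PySem.List.pyRange_zero_nat, List.map_map, List.drop_zero]
      apply List.ext_getElem
      · simp
      · intro i h1 h2
        simp only [List.getElem_map, List.getElem_range, Function.comp_apply, List.getElem_take]
        have hin : i < s.length := by simpa using h1
        by_cases h : k.length ≤ i
        · rw [if_pos (by exact_mod_cast h),
            show (i : Int) - (k.length : Int) = ((i - k.length : Nat) : Int) by omega,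
            PySem.List.pyGetD_natCast]
          rw [List.getElem_append_right (by simpa using h)]
          simp [List.getD_eq_getElem?_getD, List.getElem?_eq_getElem (by omega : i - k.length < s.length)]
        · rw [if_neg (by exact_mod_cast h),
            PySem.Int.mod_natCast, PySem.List.pyGetD_natCast,
            Nat.mod_eq_of_lt (Nat.lt_of_not_le h)]
          rw [List.getElem_append_left (by simpa using Nat.lt_of_not_le h)]
          simp [List.getD_eq_getElem?_getD, List.getElem?_eq_getElem (Nat.lt_of_not_le h)]
  | false =>
    simp only [Bool.false_eq_true, false_and, if_false]
    by_cases hnil : s = []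
    · rw [hnil]
      simp [PySem.List.pyRange]
    · have hk0 : k ≠ [] := by
        rcases hpre with h | h | h
        · exact absurd h (by simp)
        · intro hke
          apply h
          have := congrArg List.length hke
          simp [hk, PySem.Chars.upper] at this
          rw [this]
          rfl
        · exact absurd (by rw [hs, h]; rfl) hnil
      have hkq : (k.map (fun c => (c.toNat : Int) - 65)) ≠ [] := by
        simpa using hk0
      have hini := pvFoldFalse (k.map (fun c => (c.toNat : Int) - 65)) hkq s [] [] 0
      rw [Nat.add_zero, ← pvCycSelf] at hini
      simp only [Nat.cast_zero, Nat.zero_add] at hini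
      rw [hini]
      refine Prod.ext ?_ ?_
      · simpa using PySem.List.foldl_append_singleton_eq_map (fun c => (c.toNat : Int) - 65) s []
      · simp only [PySem.List.foldl_append_singleton_eq_map, List.nil_append,
          PySem.List.pyRange_zero_nat, List.map_map, List.length_map]
        refine List.map_congr_left (fun i hi => ?_)
        have hm : 0 < k.length := List.length_pos_iff.mpr hk0
        simp only [Function.comp_apply, PySem.Int.mod_natCast, PySem.List.pyGetD_natCast]
        exact (pvGetDMap k (i % k.length) (Nat.mod_lt _ hm)).symm
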